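-- pv_equiv track=rewrite | github.com/lfdyf20/Leetcode | Sentence Screen Fitting.py | online
-- ===== SOURCE A (Python) =====
-- def online(sentence, rows, cols):
-- 	s = ' '. join(sentence)
-- 	ind = 0
-- 	for i in range(rows):
-- 		ind += cols - 1
-- 		if s[ ind % len(s) ] == ' ':
-- 			ind += 1
-- 		elif s[ (ind+1) % len(s) ] == ' ':
-- 			ind += 2
-- 		else:
-- 			while ind > 0 and s[(ind-1)%len(s)] != ' ':
-- 				ind -= 1
-- 	return ind // len(s)
-- ===== SOURCE B (Python) =====
-- def online(sentence, rows, cols):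
--     s = ' '.join(sentence)
--     n = len(s)
--     if ' ' not in s:
--         # no space means a row can never end at a word boundary,
--         # so the cursor never advances and nothing complete fits
--         return 0
--     # dist[q]: backward distance from position q to the nearest space (cyclic)
--     t = 0
--     while s[n - 1 - t] != ' ':
--         t += 1
--     dist = []
--     for q in range(n):
--         t = 0 if s[q] == ' ' else t + 1
--         dist.append(t)
--     ind = 0
--     for _ in range(rows):
--         a = ind + cols - 1
--         if s[a % n] == ' ':
--             ind = a + 1
--         elif s[(a + 1) % n] == ' ':
--             ind = a + 2
--         else:
--             # back up to the previous space, never past the origin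
--             ind = max(a - dist[(a - 1) % n], 0)
--     return ind // n
-- ===== Notes on version B (the rewrite author's own statement) =====
-- stated objective: alternative
-- what changed: B precomputes, in one O(n) sweep over the joined sentence, a distance-to-previous-space table so that A's per-row backward character scan becomes an O(1) table lookup (and returns 0 outright when the joined sentence has no space, since no row can then end at a word boundary); Pre_ restricts to positive column width -- non-positive cols lie outside the task's natural domain (there A's cursor drifts to negative positions) -- and excludes the empty joined sentence, on which A raises ZeroDivisionError.
-- outside the precondition, e.g. on online(['ab', 'c'], 2, 0): A returns -1, B returns 0; on online(['ab', 'c'], 3, -2): A returns -2, B returns -1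
import Mathlib
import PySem

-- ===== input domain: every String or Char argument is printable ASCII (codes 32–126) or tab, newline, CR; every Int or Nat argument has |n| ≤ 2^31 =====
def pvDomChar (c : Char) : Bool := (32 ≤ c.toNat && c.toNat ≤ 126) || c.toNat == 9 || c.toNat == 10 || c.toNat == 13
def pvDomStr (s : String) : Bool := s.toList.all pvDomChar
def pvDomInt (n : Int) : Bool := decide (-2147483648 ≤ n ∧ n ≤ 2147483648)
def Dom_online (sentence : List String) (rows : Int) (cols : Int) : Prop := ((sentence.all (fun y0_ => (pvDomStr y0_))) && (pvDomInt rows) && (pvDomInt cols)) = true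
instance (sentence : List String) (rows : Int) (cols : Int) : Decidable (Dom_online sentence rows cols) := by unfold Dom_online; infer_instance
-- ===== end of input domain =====

-- B replaces A's per-row backward character scan by a lookup in a distance-to-previous-space
-- table precomputed once: an alternative algorithm with per-row O(1) adjustment instead of
-- A's inner while loop.

-- ===== PORT A =====
-- ' '.join(sentence), as a character list (both Pythons start with this same line)
def pvJoin (sentence : List String) : List Char :=
  PySem.Chars.join [' '] (sentence.map String.toList)

-- s[i % len(s)]  (for len(s) > 0 the index is in range, so the default is never used)
def pvChAt (cs : List Char) (i : Int) : Char :=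
  PySem.List.pyGetD cs (PySem.Int.mod i (cs.length : Int)) ' '

-- while ind > 0 and s[(ind-1)%len(s)] != ' ': ind -= 1
def pvBack (cs : List Char) (ind : Int) : Int :=
  if h : 0 < ind ∧ pvChAt cs (ind - 1) ≠ ' ' then pvBack cs (ind - 1) else ind
termination_by ind.toNat
decreasing_by omega

-- one iteration of A's row loop
def pvStepA (cs : List Char) (cols ind : Int) : Int :=
  let a := ind + cols - 1
  if pvChAt cs a = ' ' then a + 1
  else if pvChAt cs (a + 1) = ' ' then a + 2
  else pvBack cs a

def online (sentence : List String) (rows : Int) (cols : Int) : Int :=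
  let cs := pvJoin sentence
  let ind := (PySem.List.pyRange 0 rows 1).foldl (fun ind _ => pvStepA cs cols ind) 0
  PySem.Int.floordiv ind (cs.length : Int)

-- ===== PORT B =====
-- t = 0; while s[n-1-t] != ' ': t += 1   (only reached when s contains a space; the
-- 't+1 < n' conjunct is a totality guard that never fires on such inputs)
def pvInitT (cs : List Char) (t : Nat) : Nat :=
  if h : cs.getD (cs.length - 1 - t) ' ' ≠ ' ' ∧ t + 1 < cs.length then pvInitT cs (t + 1) else t
termination_by cs.length - t
decreasing_by omega

-- dist built by the forward sweep 'for q in range(n): t = 0 if s[q]==" " else t+1; dist.append(t)'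
def pvBuildDist (cs : List Char) : List Int :=
  ((List.range cs.length).foldl
    (fun (st : Int × List Int) q =>
      let t := if cs.getD q ' ' = ' ' then 0 else st.1 + 1
      (t, st.2 ++ [t]))
    ((pvInitT cs 0 : Int), [])).2

def online_alt (sentence : List String) (rows : Int) (cols : Int) : Int :=
  let cs := pvJoin sentence
  let n : Int := cs.length
  if cs.contains ' ' = false then 0
  else
    let dist := pvBuildDist cs
    let ind := (PySem.List.pyRange 0 rows 1).foldl
      (fun ind _ =>
        let a := ind + cols - 1
        if cs.getD (PySem.Int.mod a n).toNat ' ' = ' ' then a + 1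
        else if cs.getD (PySem.Int.mod (a + 1) n).toNat ' ' = ' ' then a + 2
        else max (a - dist.getD (PySem.Int.mod (a - 1) n).toNat 0) 0) 0
    PySem.Int.floordiv ind n

-- ===== PRECONDITION & SPEC =====
-- Pre_ restricts to positive column width (non-positive cols lie outside the task's
-- natural domain) and excludes sentence = [] and [""], where ' '.join(sentence) is
-- empty and A raises ZeroDivisionError.
def Pre_online (sentence : List String) (rows : Int) (cols : Int) : Prop :=
  sentence ≠ [] ∧ sentence ≠ [""] ∧ 1 ≤ cols
instance (sentence : List String) (rows : Int) (cols : Int) : Decidable (Pre_online sentence rows cols) := by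
  unfold Pre_online; infer_instance

def pvWitness_online : List String × Int × Int := (["hello", "world"], 3, 7)

def Spec_online (sentence : List String) (rows : Int) (cols : Int) (out : Int) : Prop :=
  out = online_alt sentence rows cols
instance (sentence : List String) (rows : Int) (cols : Int) (out : Int) : Decidable (Spec_online sentence rows cols out) := by
  unfold Spec_online; infer_instance

-- ===== CLAIM (what is proved, stated in full; the proofs are below) =====
def Claim_equal_online : Prop := ∀ (sentence : List String) (rows : Int) (cols : Int), Dom_online sentence rows cols → Pre_online sentence rows cols → Spec_online sentence rows cols (online sentence rows cols)

-- ===== LEMMAS AND PROOFS =====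

theorem pv_mem_of_contains (cs : List Char) (h : ¬ cs.contains ' ' = false) : ' ' ∈ cs := by
  by_cases hm : ' ' ∈ cs
  · exact hm
  · exact absurd (by simp [hm]) h

theorem pv_not_mem_of_contains (cs : List Char) (h : cs.contains ' ' = false) : ' ' ∉ cs := by
  intro hm
  simp [hm] at h

theorem pvJoin_ne_nil (sentence : List String) (h1 : sentence ≠ []) (h2 : sentence ≠ [""]) :
    pvJoin sentence ≠ [] := by
  match sentence with
  | [] => exact absurd rfl h1
  | [w] =>
    have hw : w ≠ "" := by intro hw; exact h2 (by rw [hw])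
    unfold pvJoin
    simp only [List.map, PySem.Chars.join_singleton]
    intro hnil
    apply hw
    have h0 : w.toList = "".toList := by simpa using hnil
    exact String.toList_inj.mp h0
  | a :: b :: rest =>
    unfold pvJoin
    simp only [List.map, PySem.Chars.join_cons_cons]
    simp

theorem pvChAt_getD (cs : List Char) (hn : 0 < cs.length) (i : Int) :
    pvChAt cs i = cs.getD (PySem.Int.mod i (cs.length : Int)).toNat ' ' := by
  have hpos : (0 : Int) < cs.length := by exact_mod_cast hn
  have h0 := PySem.Int.mod_nonneg i hpos
  have h1 := PySem.Int.mod_lt i hpos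
  rw [pvChAt, PySem.List.pyGetD_eq_getElem _ ' ' h0 h1, List.getD_eq_getElem _ _ (by omega)]

theorem pvChAt_mem (cs : List Char) (hn : 0 < cs.length) (i : Int) : pvChAt cs i ∈ cs := by
  have hpos : (0 : Int) < cs.length := by exact_mod_cast hn
  rw [pvChAt, PySem.List.pyGetD_eq_getElem _ ' ' (PySem.Int.mod_nonneg i hpos) (PySem.Int.mod_lt i hpos)]
  exact List.getElem_mem _

theorem pvChAt_congr (cs : List Char) (i j : Int)
    (h : PySem.Int.mod i (cs.length : Int) = PySem.Int.mod j (cs.length : Int)) :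
    pvChAt cs i = pvChAt cs j := by
  unfold pvChAt; rw [h]

theorem pv_mod_mod (cs : List Char) (hn : 0 < cs.length) (i : Int) :
    PySem.Int.mod (PySem.Int.mod i (cs.length : Int)) (cs.length : Int)
      = PySem.Int.mod i (cs.length : Int) := by
  have hpos : (0 : Int) < cs.length := by exact_mod_cast hn
  simp only [PySem.Int.mod_eq_emod_of_pos hpos]
  exact Int.emod_emod_of_dvd _ dvd_rfl

theorem pv_mod_sub_congr (cs : List Char) (hn : 0 < cs.length) (i j u : Int)
    (h : PySem.Int.mod i (cs.length : Int) = PySem.Int.mod j (cs.length : Int)) :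
    PySem.Int.mod (i - u) (cs.length : Int) = PySem.Int.mod (j - u) (cs.length : Int) := by
  have hpos : (0 : Int) < cs.length := by exact_mod_cast hn
  rw [PySem.Int.mod_eq_emod_of_pos hpos, PySem.Int.mod_eq_emod_of_pos hpos] at *
  rw [Int.sub_emod i u, Int.sub_emod j u, h]

theorem pvExLt (cs : List Char) (hsp : ' ' ∈ cs) (q : Int) :
    ∃ u : Nat, u < cs.length ∧ pvChAt cs (q - u) = ' ' := by
  obtain ⟨j, hj, hjc⟩ := List.getElem_of_mem hsp
  have hpos : (0 : Int) < cs.length := by exact_mod_cast (by omega : 0 < cs.length)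
  have hne : (cs.length : Int) ≠ 0 := by omega
  have hnn : 0 ≤ (q - (j : Int)) % (cs.length : Int) := Int.emod_nonneg _ hne
  have hlt : (q - (j : Int)) % (cs.length : Int) < (cs.length : Int) := Int.emod_lt_of_pos _ hpos
  refine ⟨((q - (j : Int)) % (cs.length : Int)).toNat, by omega, ?_⟩
  have hval : ((((q - (j : Int)) % (cs.length : Int)).toNat : Int)) = (q - (j : Int)) % (cs.length : Int) :=
    Int.toNat_of_nonneg hnn
  have hmod : PySem.Int.mod (q - (((q - (j : Int)) % (cs.length : Int)).toNat : Int)) (cs.length : Int) = (j : Int) := by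
    rw [PySem.Int.mod_eq_emod_of_pos hpos, hval]
    conv_lhs => rw [Int.sub_emod]
    rw [Int.emod_emod_of_dvd _ dvd_rfl, ← Int.sub_emod]
    have e : q - (q - (j : Int)) = (j : Int) := by ring
    rw [e, Int.emod_eq_of_lt (by omega) (by exact_mod_cast hj)]
  rw [pvChAt, hmod, PySem.List.pyGetD_eq_getElem _ ' ' (by omega) (by exact_mod_cast hj)]
  simpa using hjc

theorem pvEx (cs : List Char) (hsp : ' ' ∈ cs) (q : Int) :
    ∃ u : Nat, pvChAt cs (q - u) = ' ' :=
  (pvExLt cs hsp q).imp fun _ h => h.2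

-- distance (backwards, cyclic) from q to the nearest space
def pvDQ (cs : List Char) (hsp : ' ' ∈ cs) (q : Int) : Nat := Nat.find (pvEx cs hsp q)

theorem pvDQ_lt (cs : List Char) (hsp : ' ' ∈ cs) (q : Int) : pvDQ cs hsp q < cs.length := by
  obtain ⟨u, hu, hc⟩ := pvExLt cs hsp q
  exact (Nat.find_lt_iff _ _).mpr ⟨u, hu, hc⟩

theorem pvDQ_zero (cs : List Char) (hsp : ' ' ∈ cs) (q : Int) (h : pvChAt cs q = ' ') :
    pvDQ cs hsp q = 0 := by
  unfold pvDQ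
  rw [Nat.find_eq_zero]
  simpa using h

theorem pvDQ_spec (cs : List Char) (hsp : ' ' ∈ cs) (q : Int) :
    pvChAt cs (q - pvDQ cs hsp q) = ' ' := Nat.find_spec (pvEx cs hsp q)

theorem pvDQ_min (cs : List Char) (hsp : ' ' ∈ cs) (q : Int) (u : Nat) (h : u < pvDQ cs hsp q) :
    pvChAt cs (q - u) ≠ ' ' := Nat.find_min (pvEx cs hsp q) h

theorem pvDQ_succ (cs : List Char) (hsp : ' ' ∈ cs) (q : Int) (h : pvChAt cs q ≠ ' ') :
    pvDQ cs hsp q = pvDQ cs hsp (q - 1) + 1 := by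
  unfold pvDQ
  rw [Nat.find_eq_iff]
  constructor
  · have hs := Nat.find_spec (pvEx cs hsp (q - 1))
    have e : q - ((Nat.find (pvEx cs hsp (q - 1)) + 1 : Nat) : Int)
        = q - 1 - (Nat.find (pvEx cs hsp (q - 1)) : Int) := by push_cast; ring
    rw [e]
    exact hs
  · intro m hm
    match m with
    | 0 => simpa using h
    | u + 1 =>
      have hu : u < Nat.find (pvEx cs hsp (q - 1)) := by omega
      have := Nat.find_min (pvEx cs hsp (q - 1)) hu
      have e : q - ((u + 1 : Nat) : Int) = q - 1 - (u : Int) := by push_cast; ring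
      rw [e]
      exact this

theorem pvDQ_congr (cs : List Char) (hn : 0 < cs.length) (hsp : ' ' ∈ cs) (q q' : Int)
    (h : PySem.Int.mod q (cs.length : Int) = PySem.Int.mod q' (cs.length : Int)) :
    pvDQ cs hsp q = pvDQ cs hsp q' := by
  have hiff : ∀ u : Nat, (pvChAt cs (q - u) = ' ') ↔ (pvChAt cs (q' - u) = ' ') := by
    intro u
    rw [pvChAt_congr cs _ _ (pv_mod_sub_congr cs hn q q' u h)]
  exact le_antisymm
    (Nat.find_min' _ ((hiff _).mpr (Nat.find_spec (pvEx cs hsp q'))))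
    (Nat.find_min' _ ((hiff _).mp (Nat.find_spec (pvEx cs hsp q))))

theorem pvBack_le (cs : List Char) (a : Int) (ha : a ≤ 0) : pvBack cs a = a := by
  rw [pvBack, dif_neg]
  rintro ⟨h, -⟩
  omega

theorem pvBack_eq (cs : List Char) (hn : 0 < cs.length) (hsp : ' ' ∈ cs) (a : Int) (ha : 0 < a) :
    pvBack cs a = if (pvDQ cs hsp (a - 1) : Int) < a then a - pvDQ cs hsp (a - 1) else 0 := by
  have key : ∀ (k : Nat) (a : Int), a.toNat = k → 0 < a →
      pvBack cs a = if (pvDQ cs hsp (a - 1) : Int) < a then a - pvDQ cs hsp (a - 1) else 0 := by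
    intro k
    induction k with
    | zero => intro a hk ha; omega
    | succ k ih =>
      intro a hk ha
      by_cases hch : pvChAt cs (a - 1) = ' '
      · rw [pvBack, dif_neg (by rintro ⟨-, hne⟩; exact hne hch)]
        rw [pvDQ_zero cs hsp (a - 1) hch]
        rw [if_pos (by push_cast; omega)]
        simp
      · have hd := pvDQ_succ cs hsp (a - 1) hch
        rw [pvBack, dif_pos ⟨ha, hch⟩]
        by_cases h1 : 0 < a - 1
        · rw [ih (a - 1) (by omega) h1, hd]
          split_ifs <;> push_cast at * <;> omega
        · have ha1 : a = 1 := by omega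
          subst ha1
          rw [show (1 : Int) - 1 = 0 from by norm_num, pvBack,
            dif_neg (by rintro ⟨h, -⟩; exact absurd h (lt_irrefl 0))]
          rw [show (1 : Int) - 1 = 0 from by norm_num] at hd
          rw [hd, if_neg (by push_cast; omega)]
  exact key a.toNat a rfl ha

theorem pvBack_nospace (cs : List Char) (hn : 0 < cs.length) (hno : ' ' ∉ cs) (a : Int) :
    pvBack cs a = if 0 < a then 0 else a := by
  have hch : ∀ i, pvChAt cs i ≠ ' ' := fun i hi => hno (hi ▸ pvChAt_mem cs hn i)
  have key : ∀ (k : Nat) (a : Int), a.toNat = k → pvBack cs a = if 0 < a then 0 else a := by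
    intro k
    induction k with
    | zero =>
      intro a hk
      rw [pvBack, dif_neg (by rintro ⟨h, -⟩; omega), if_neg (by omega)]
    | succ k ih =>
      intro a hk
      rw [pvBack, dif_pos ⟨by omega, hch _⟩, ih (a - 1) (by omega)]
      split_ifs <;> omega
  exact key a.toNat a rfl

theorem pv_getD_chAt (cs : List Char) (t : Nat) (ht : t < cs.length) :
    cs.getD t ' ' = pvChAt cs (t : Int) := by
  have hpos : (0 : Int) < cs.length := by exact_mod_cast (by omega : 0 < cs.length)
  have hm : PySem.Int.mod ((t : Nat) : Int) (cs.length : Int) = (t : Int) := by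
    rw [PySem.Int.mod_eq_emod_of_pos hpos, Int.emod_eq_of_lt (by omega) (by exact_mod_cast ht)]
  rw [pvChAt, hm]
  simp

theorem pvInitT_eq (cs : List Char) (hn : 0 < cs.length) (hsp : ' ' ∈ cs) :
    pvInitT cs 0 = pvDQ cs hsp (-1) := by
  have hcong : pvDQ cs hsp ((cs.length : Int) - 1) = pvDQ cs hsp (-1) := by
    apply pvDQ_congr cs hn hsp
    have hpos : (0 : Int) < cs.length := by exact_mod_cast hn
    rw [PySem.Int.mod_eq_emod_of_pos hpos, PySem.Int.mod_eq_emod_of_pos hpos]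
    rw [show (cs.length : Int) - 1 = -1 + (cs.length : Int) * 1 from by ring,
      Int.add_mul_emod_self_left]
  rw [← hcong]
  set d := pvDQ cs hsp ((cs.length : Int) - 1) with hdd
  have hdlt : d < cs.length := pvDQ_lt cs hsp _
  have key : ∀ (k t : Nat), t ≤ d → d - t = k → pvInitT cs t = d := by
    intro k
    induction k with
    | zero =>
      intro t ht hk
      have htd : t = d := by omega
      rw [pvInitT, dif_neg]
      · exact htd
      · rintro ⟨hne, -⟩
        apply hne
        rw [pv_getD_chAt cs _ (by omega)]
        have e : ((cs.length - 1 - t : Nat) : Int) = (cs.length : Int) - 1 - (t : Int) := by omega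
        rw [e, htd]
        exact pvDQ_spec cs hsp _
    | succ k ih =>
      intro t ht hk
      have htd : t < d := by omega
      rw [pvInitT, dif_pos]
      · exact ih (t + 1) (by omega) (by omega)
      · constructor
        · rw [pv_getD_chAt cs _ (by omega)]
          have e : ((cs.length - 1 - t : Nat) : Int) = (cs.length : Int) - 1 - (t : Int) := by omega
          rw [e]
          exact pvDQ_min cs hsp _ t htd
        · omega
  exact key d 0 (by omega) (by omega)

theorem pvBuild_inv (cs : List Char) (hn : 0 < cs.length) (hsp : ' ' ∈ cs) (m : Nat) (hm : m ≤ cs.length) :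
    (List.range m).foldl
      (fun (st : Int × List Int) q =>
        let t := if cs.getD q ' ' = ' ' then 0 else st.1 + 1
        (t, st.2 ++ [t]))
      (((pvDQ cs hsp (-1) : Nat) : Int), ([] : List Int))
    = (((pvDQ cs hsp ((m : Int) - 1) : Nat) : Int),
       (List.range m).map fun (q : Nat) => ((pvDQ cs hsp (q : Int) : Nat) : Int)) := by
  induction m with
  | zero =>
    simp only [List.range_zero, List.foldl_nil, List.map_nil]
    norm_num
  | succ m ih =>
    rw [List.range_succ, List.foldl_append, ih (by omega)]
    simp only [List.foldl_cons, List.foldl_nil]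
    have hg : cs.getD m ' ' = pvChAt cs (m : Int) := pv_getD_chAt cs m (by omega)
    have e : ((m + 1 : Nat) : Int) - 1 = (m : Int) := by push_cast; ring
    by_cases hch : pvChAt cs (m : Int) = ' '
    · have h0 : pvDQ cs hsp (m : Int) = 0 := pvDQ_zero cs hsp _ hch
      simp only [hg, if_pos hch, List.map_append, List.map_cons, List.map_nil, e, h0]
      norm_num
    · have hsucc : pvDQ cs hsp (m : Int) = pvDQ cs hsp ((m : Int) - 1) + 1 :=
        pvDQ_succ cs hsp _ hch
      simp only [hg, if_neg hch, List.map_append, List.map_cons, List.map_nil, e, hsucc]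
      push_cast
      rfl

theorem pvBuildDist_eq (cs : List Char) (hn : 0 < cs.length) (hsp : ' ' ∈ cs) :
    pvBuildDist cs = (List.range cs.length).map fun (q : Nat) => ((pvDQ cs hsp (q : Int) : Nat) : Int) := by
  unfold pvBuildDist
  rw [pvInitT_eq cs hn hsp, pvBuild_inv cs hn hsp cs.length le_rfl]

theorem pvDist_lookup (cs : List Char) (hn : 0 < cs.length) (hsp : ' ' ∈ cs) (p : Int)
    (h0 : 0 ≤ p) (h1 : p < (cs.length : Int)) :
    (pvBuildDist cs).getD p.toNat 0 = ((pvDQ cs hsp p : Nat) : Int) := by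
  rw [pvBuildDist_eq cs hn hsp]
  have hlt : p.toNat < cs.length := by omega
  rw [List.getD_eq_getElem _ _ (by simpa using hlt)]
  simp only [List.getElem_map, List.getElem_range]
  have e : ((p.toNat : Nat) : Int) = p := Int.toNat_of_nonneg h0
  rw [e]

-- A's row step equals B's table-lookup row step, for nonnegative cursor and cols ≥ 1
theorem pvStep_eq (cs : List Char) (hn : 0 < cs.length) (hsp : ' ' ∈ cs) (cols ind : Int)
    (hcols : 1 ≤ cols) (hind : 0 ≤ ind) :
    pvStepA cs cols ind =
      (let a := ind + cols - 1
       if cs.getD (PySem.Int.mod a (cs.length : Int)).toNat ' ' = ' ' then a + 1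
       else if cs.getD (PySem.Int.mod (a + 1) (cs.length : Int)).toNat ' ' = ' ' then a + 2
       else max (a - (pvBuildDist cs).getD (PySem.Int.mod (a - 1) (cs.length : Int)).toNat 0) 0) := by
  unfold pvStepA
  dsimp only
  set a := ind + cols - 1 with ha
  have hann : 0 ≤ a := by omega
  rw [← pvChAt_getD cs hn a, ← pvChAt_getD cs hn (a + 1)]
  by_cases h1 : pvChAt cs a = ' '
  · rw [if_pos h1, if_pos h1]
  by_cases h2 : pvChAt cs (a + 1) = ' '
  · rw [if_neg h1, if_neg h1, if_pos h2, if_pos h2]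
  rw [if_neg h1, if_neg h1, if_neg h2, if_neg h2]
  have hpos : (0 : Int) < cs.length := by exact_mod_cast hn
  rw [pvDist_lookup cs hn hsp _ (PySem.Int.mod_nonneg _ hpos) (PySem.Int.mod_lt _ hpos)]
  rw [pvDQ_congr cs hn hsp (PySem.Int.mod (a - 1) (cs.length : Int)) (a - 1) (pv_mod_mod cs hn (a - 1))]
  by_cases h3 : a = 0
  · rw [h3, pvBack_le cs 0 le_rfl]
    omega
  · rw [pvBack_eq cs hn hsp a (by omega)]
    split_ifs <;> omega

theorem pvStep_nonneg (cs : List Char) (hn : 0 < cs.length) (hsp : ' ' ∈ cs) (cols ind : Int)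
    (hcols : 1 ≤ cols) (hind : 0 ≤ ind) : 0 ≤ pvStepA cs cols ind := by
  unfold pvStepA
  dsimp only
  set a := ind + cols - 1 with ha
  have hanr : 0 ≤ a := by omega
  split_ifs with h1 h2
  · omega
  · omega
  · by_cases h3 : a = 0
    · rw [h3, pvBack_le cs 0 le_rfl]
    · rw [pvBack_eq cs hn hsp a (by omega)]
      split_ifs <;> omega

-- fold a list with two functions that agree (and preserve nonnegativity) on nonneg states
theorem pv_foldl_inv_congr (f g : Int → Int → Int)
    (hfg : ∀ s b, 0 ≤ s → f s b = g s b) (hf : ∀ s b, 0 ≤ s → 0 ≤ f s b) :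
    ∀ (l : List Int) (x : Int), 0 ≤ x → l.foldl f x = l.foldl g x := by
  intro l
  induction l with
  | nil => intro x _; rfl
  | cons b l ih =>
    intro x hx
    simp only [List.foldl_cons]
    rw [← hfg x b hx, ih (f x b) (hf x b hx)]

theorem pv_nospace_fold_zero (cs : List Char) (hn : 0 < cs.length) (hno : ' ' ∉ cs)
    (cols : Int) (hc : 0 ≤ cols - 1) :
    ∀ (l : List Int), l.foldl (fun ind _ => pvStepA cs cols ind) 0 = 0 := by
  have hch : ∀ i, pvChAt cs i ≠ ' ' := fun i hi => hno (hi ▸ pvChAt_mem cs hn i)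
  have hstep : pvStepA cs cols 0 = 0 := by
    unfold pvStepA
    dsimp only
    rw [if_neg (hch _), if_neg (hch _), pvBack_nospace cs hn hno _]
    split_ifs <;> omega
  intro l
  induction l with
  | nil => rfl
  | cons b l ih => simp only [List.foldl_cons, hstep, ih]

-- ===== VERDICT (by name: the statement is the Claim_ definition above) =====
theorem online_spec : Claim_equal_online := by
  intro sentence rows cols _ hpre
  obtain ⟨h1, h2, hcols⟩ := hpre
  simp only [Spec_online, online, online_alt]
  have hne : pvJoin sentence ≠ [] := pvJoin_ne_nil sentence h1 h2
  set cs := pvJoin sentence with hcs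
  have hn : 0 < cs.length := List.length_pos_of_ne_nil hne
  have hpos : (0 : Int) < cs.length := by exact_mod_cast hn
  by_cases hc : cs.contains ' ' = false
  · rw [if_pos hc]
    have hno := pv_not_mem_of_contains cs hc
    rw [pv_nospace_fold_zero cs hn hno cols (by omega)]
    rw [PySem.Int.floordiv_eq_ediv_of_pos hpos]
    simp
  · rw [if_neg hc]
    have hsp := pv_mem_of_contains cs hc
    congr 1
    exact pv_foldl_inv_congr _ _
      (fun s b hs => pvStep_eq cs hn hsp cols s hcols hs)
      (fun s b hs => pvStep_nonneg cs hn hsp cols s hcols hs)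
      (PySem.List.pyRange 0 rows 1) 0 le_rfl
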